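/- GENERATED by farm/mkstatement.py from design/units.tsv (unit `DGifGetPrefixChar`) and the Specs of Gif/Spec/*.lean — do not edit.
   THE STATEMENT of the proof unit `DGifGetPrefixChar`: the function `DGifGetPrefixChar` (30 instructions) satisfies its contract,
   given the contracts of its callees. What the names mean: ProgX/Base/Spec/Basic.lean. The theorem to prove:
   `theorem DGifGetPrefixChar_ok : Gif.Spec.DGifGetPrefixChar.Statement`. -/
import Gif.Code
import Gif.Dec.All
import Gif.Labels
import Gif.Spec.Lzw
namespace Gif.Spec.DGifGetPrefixChar
open X86 X86.User Asan

/-- The statement of unit `DGifGetPrefixChar`. -/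
def Statement : Prop :=
  ∀ (Lay : Layout) (_hLay : Lay.hi = 0x1000000) (μ : Microarch) (_hμ : UserX.MicroOK μ) (u₀ : State)
    (_hcode : HasCodeNat Lay u₀ Gif.L.DGifGetPrefixChar.entry Gif.Code.code_DGifGetPrefixChar.nat Gif.L.DGifGetPrefixChar.size)
    (_h_asan_load4_noabort : Asan.SmallCheck Lay μ ProgX.Base.WayInv (ProgX.Base.CodeOK u₀) [.rax, .rcx, .rdx] 4 ProgX.Base.L.__asan_load4_noabort.entry),
    ∀ (H : Heap) (rest : List Obj) (frames : List (Nat × FrameLayout)) (pv : Nat), Calls Lay μ ProgX.Base.WayInv (ProgX.Base.conv u₀) Gif.L.DGifGetPrefixChar.entry (Gif.Spec.DGifGetPrefixChar.spec H rest frames pv)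

end Gif.Spec.DGifGetPrefixChar
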